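-- pv_equiv track=rewrite | github.com/weissye/BpTestTell | scripts/readable/emit_readables_from_gold.py | prefer_keys
-- ===== SOURCE A (Python) =====
-- def prefer_keys(path_keys, body_keys):
--     # prefer path keys; if none, choose common identity-like keys from body
--     if path_keys:
--         return path_keys
--     if not body_keys:
--         return []
--     # favor id / *Id first, keep stable order
--     scored = []
--     for k in body_keys:
--         score = 0
--         if k.lower() == "id": score += 5
--         if k.lower().endswith("id"): score += 4
--         if "name" in k.lower(): score += 2
--         scored.append((score, k))
--     scored.sort(key=lambda t:(-t[0], body_keys.index(t[1])))
--     # take up to 2 to allow composite keys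
--     return [k for _, k in scored[:2]]
-- ===== SOURCE B (Python) =====
-- def prefer_keys(path_keys, body_keys):
--     # prefer path keys; if none, bucket body keys by score (a counting sort) and take the first two
--     if path_keys:
--         return path_keys
--     b9, b6, b4, b2, b0 = [], [], [], [], []
--     for k in body_keys:
--         s = (5 if k.lower() == "id" else 0) + (4 if k.lower().endswith("id") else 0) + (2 if "name" in k.lower() else 0)
--         if s == 9:
--             b9.append(k)
--         elif s == 6:
--             b6.append(k)
--         elif s == 4:
--             b4.append(k)
--         elif s == 2:
--             b2.append(k)
--         else:
--             b0.append(k)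
--     return (b9 + b6 + b4 + b2 + b0)[:2]
-- ===== Notes on version B (the rewrite author's own statement) =====
-- stated objective: simpler
-- what changed: Replaces the build-pairs + stable sort by (-score, body_keys.index) + slice pipeline with a single bucketing pass over the five possible scores (counting-sort style) that takes the first two of the concatenated buckets; no comparison sort and no .index calls remain.
-- outside the precondition, e.g. on prefer_keys([], ['a', 'b', 'a']): A returns ['a', 'a'], B returns ['a', 'b']
import Mathlib
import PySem

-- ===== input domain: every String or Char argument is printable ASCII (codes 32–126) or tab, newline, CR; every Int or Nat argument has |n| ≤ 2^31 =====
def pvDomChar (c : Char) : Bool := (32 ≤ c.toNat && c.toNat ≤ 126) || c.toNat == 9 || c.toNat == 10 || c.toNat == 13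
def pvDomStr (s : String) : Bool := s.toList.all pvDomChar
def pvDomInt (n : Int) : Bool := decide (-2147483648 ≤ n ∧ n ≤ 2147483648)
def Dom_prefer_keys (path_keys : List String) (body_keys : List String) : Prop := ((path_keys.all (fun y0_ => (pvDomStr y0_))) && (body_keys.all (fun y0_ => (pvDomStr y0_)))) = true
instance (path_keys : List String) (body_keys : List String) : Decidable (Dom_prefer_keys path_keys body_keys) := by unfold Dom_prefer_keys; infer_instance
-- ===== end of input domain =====

-- B replaces the build-pairs + sort-by-(-score, body_keys.index) + slice pipeline with a single
-- bucketing pass over the five possible scores and takes the first two of the concatenated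
-- buckets (objective: simpler).

-- ===== PORT A =====
def prefer_keys (path_keys : List String) (body_keys : List String) : List String :=
  if path_keys ≠ [] then path_keys
  else if body_keys = [] then []
  else
    let scored : List (Int × String) :=
      body_keys.foldl (fun acc k =>
        let score : Int := 0
        let score := if PySem.Str.lower k == "id" then score + 5 else score
        let score := if PySem.Str.endswith (PySem.Str.lower k) "id" then score + 4 else score
        let score := if PySem.Str.isIn "name" (PySem.Str.lower k) then score + 2 else score
        acc ++ [(score, k)]) []
    -- sort key (-t[0], body_keys.index(t[1])); every t[1] is drawn from body_keys, so
    -- .index never raises: exact via (index? …).getD 0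
    let scored := PySem.List.sorted2 scored (fun t => -t.1)
        (fun t => (PySem.List.index? body_keys t.2).getD 0)
    (PySem.List.slice scored none (some 2)).map (fun t => t.2)

-- ===== PORT B =====
def pvScoreB (k : String) : Int :=
  (if PySem.Str.lower k == "id" then (5 : Int) else 0) +
  (if PySem.Str.endswith (PySem.Str.lower k) "id" then 4 else 0) +
  (if PySem.Str.isIn "name" (PySem.Str.lower k) then 2 else 0)

-- the loop body of Source B: route k into the bucket of its score
def pvBStep (acc : List String × List String × List String × List String × List String)
    (k : String) : List String × List String × List String × List String × List String :=
  let s := pvScoreB k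
  if s == 9 then (acc.1 ++ [k], acc.2.1, acc.2.2.1, acc.2.2.2.1, acc.2.2.2.2)
  else if s == 6 then (acc.1, acc.2.1 ++ [k], acc.2.2.1, acc.2.2.2.1, acc.2.2.2.2)
  else if s == 4 then (acc.1, acc.2.1, acc.2.2.1 ++ [k], acc.2.2.2.1, acc.2.2.2.2)
  else if s == 2 then (acc.1, acc.2.1, acc.2.2.1, acc.2.2.2.1 ++ [k], acc.2.2.2.2)
  else (acc.1, acc.2.1, acc.2.2.1, acc.2.2.2.1, acc.2.2.2.2 ++ [k])

def prefer_keys_alt (path_keys : List String) (body_keys : List String) : List String :=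
  if path_keys ≠ [] then path_keys
  else
    let bs := body_keys.foldl pvBStep ([], [], [], [], [])
    PySem.List.slice (bs.1 ++ bs.2.1 ++ bs.2.2.1 ++ bs.2.2.2.1 ++ bs.2.2.2.2) none (some 2)

-- ===== PRECONDITION & SPEC =====
-- Pre_ excludes inputs with an empty path_keys and duplicate body keys: there A's sort key uses
-- body_keys.index (always the FIRST occurrence), so the position of a later duplicate in the sorted
-- order is an accident of that first-occurrence keying, and B keeps positional order instead.
def Pre_prefer_keys (path_keys : List String) (body_keys : List String) : Prop :=
  path_keys = [] → body_keys.Nodup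
instance (path_keys : List String) (body_keys : List String) : Decidable (Pre_prefer_keys path_keys body_keys) := by unfold Pre_prefer_keys; infer_instance

def pvWitness_prefer_keys : List String × List String := ([], ["id", "userName"])

def Spec_prefer_keys (path_keys : List String) (body_keys : List String) (out : List String) : Prop := out = prefer_keys_alt path_keys body_keys
instance (path_keys : List String) (body_keys : List String) (out : List String) : Decidable (Spec_prefer_keys path_keys body_keys out) := by unfold Spec_prefer_keys; infer_instance

-- ===== CLAIM (what is proved, stated in full; the proofs are below) =====
def Claim_equal_prefer_keys : Prop := ∀ (path_keys : List String) (body_keys : List String), Dom_prefer_keys path_keys body_keys → Pre_prefer_keys path_keys body_keys → Spec_prefer_keys path_keys body_keys (prefer_keys path_keys body_keys)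

-- ===== LEMMAS AND PROOFS =====

lemma pvScore_cases (k : String) :
    pvScoreB k = 0 ∨ pvScoreB k = 2 ∨ pvScoreB k = 4 ∨ pvScoreB k = 6 ∨ pvScoreB k = 9 := by
  unfold pvScoreB
  by_cases h1 : PySem.Str.lower k == "id"
  · have h : PySem.Str.lower k = "id" := eq_of_beq h1
    simp only [h]
    decide
  · rw [if_neg (by simpa using h1)]
    split_ifs <;> norm_num

lemma pvScoreA_eq (k : String) :
    (let score : Int := 0
     let score := if PySem.Str.lower k == "id" then score + 5 else score
     let score := if PySem.Str.endswith (PySem.Str.lower k) "id" then score + 4 else score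
     let score := if PySem.Str.isIn "name" (PySem.Str.lower k) then score + 2 else score
     score) = pvScoreB k := by
  simp only [pvScoreB]
  split_ifs <;> norm_num

-- the pairing map of A's scoring loop, and the bucket concatenation of B
def pvPair (k : String) : Int × String := (pvScoreB k, k)

def pvIdx (body : List String) (k : String) : Nat := (PySem.List.index? body k).getD 0

def pvF (body : List String) : List String :=
  body.filter (fun k => pvScoreB k == 9) ++ body.filter (fun k => pvScoreB k == 6) ++
  body.filter (fun k => pvScoreB k == 4) ++ body.filter (fun k => pvScoreB k == 2) ++
  body.filter (fun k => pvScoreB k == 0)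

lemma pvE2 (l : List String) :
    (l.filter (fun k => !(pvScoreB k == 9))).filter (fun k => pvScoreB k == 6)
      = l.filter (fun k => pvScoreB k == 6) := by
  rw [List.filter_filter]
  apply List.filter_congr
  intro x _
  by_cases h : pvScoreB x = 6 <;> simp [h]

lemma pvE3 (l : List String) :
    (((l.filter (fun k => !(pvScoreB k == 9))).filter (fun k => !(pvScoreB k == 6))).filter
        (fun k => pvScoreB k == 4))
      = l.filter (fun k => pvScoreB k == 4) := by
  rw [List.filter_filter, List.filter_filter]
  apply List.filter_congr
  intro x _
  rcases pvScore_cases x with h|h|h|h|h <;> simp [h]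

lemma pvE4 (l : List String) :
    ((((l.filter (fun k => !(pvScoreB k == 9))).filter (fun k => !(pvScoreB k == 6))).filter
        (fun k => !(pvScoreB k == 4))).filter (fun k => pvScoreB k == 2))
      = l.filter (fun k => pvScoreB k == 2) := by
  rw [List.filter_filter, List.filter_filter, List.filter_filter]
  apply List.filter_congr
  intro x _
  rcases pvScore_cases x with h|h|h|h|h <;> simp [h]

lemma pvE5 (l : List String) :
    ((((l.filter (fun k => !(pvScoreB k == 9))).filter (fun k => !(pvScoreB k == 6))).filter
        (fun k => !(pvScoreB k == 4))).filter (fun k => !(pvScoreB k == 2)))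
      = l.filter (fun k => pvScoreB k == 0) := by
  rw [List.filter_filter, List.filter_filter, List.filter_filter]
  apply List.filter_congr
  intro x _
  rcases pvScore_cases x with h|h|h|h|h <;> simp [h]

lemma pvBucket_perm (l : List String) : (pvF l).Perm l := by
  have h1 := List.filter_append_perm (fun k => pvScoreB k == 9) l
  have h2 := List.filter_append_perm (fun k => pvScoreB k == 6)
      (l.filter (fun k => !(pvScoreB k == 9)))
  have h3 := List.filter_append_perm (fun k => pvScoreB k == 4)
      ((l.filter (fun k => !(pvScoreB k == 9))).filter (fun k => !(pvScoreB k == 6)))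
  have h4 := List.filter_append_perm (fun k => pvScoreB k == 2)
      (((l.filter (fun k => !(pvScoreB k == 9))).filter (fun k => !(pvScoreB k == 6))).filter
        (fun k => !(pvScoreB k == 4)))
  rw [pvE2] at h2
  rw [pvE3] at h3
  rw [pvE4, pvE5] at h4
  have hl : l.Perm (l.filter (fun k => pvScoreB k == 9) ++ (l.filter (fun k => pvScoreB k == 6) ++
      (l.filter (fun k => pvScoreB k == 4) ++ (l.filter (fun k => pvScoreB k == 2) ++
        l.filter (fun k => pvScoreB k == 0))))) := by
    refine h1.symm.trans ?_
    refine List.Perm.append_left _ ?_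
    refine h2.symm.trans ?_
    refine List.Perm.append_left _ ?_
    refine h3.symm.trans ?_
    refine List.Perm.append_left _ ?_
    exact h4.symm
  have := hl.symm
  unfold pvF
  simpa [List.append_assoc] using this

lemma pvSorted2_eq_sorted_lex (xs : List (Int × String)) (k1 : Int × String → Int)
    (k2 : Int × String → Nat) :
    PySem.List.sorted2 xs k1 k2 = PySem.List.sorted xs (fun a => toLex (k1 a, k2 a)) := by
  have hb : (fun (a b : Int × String) =>
        decide (k1 a < k1 b) || (!decide (k1 b < k1 a) && decide (k2 a < k2 b)))
      = (fun a b => decide ((fun t => toLex (k1 t, k2 t)) a < (fun t => toLex (k1 t, k2 t)) b)) := by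
    funext a b
    rcases lt_trichotomy (k1 a) (k1 b) with h|h|h
    · simp [Prod.Lex.toLex_lt_toLex, h, lt_asymm h]
    · simp [Prod.Lex.toLex_lt_toLex, h]
    · simp [Prod.Lex.toLex_lt_toLex, h, lt_asymm h, ne_of_gt h]
  have h0 : PySem.List.sorted2 xs k1 k2 = List.foldl (fun acc x => PySem.List.insertBy
      (fun a b => decide (k1 a < k1 b) || (!decide (k1 b < k1 a) && decide (k2 a < k2 b))) x acc)
      [] xs := rfl
  rw [h0, hb, ← PySem.List.sorted_eq_foldl_insertBy]

lemma pvIdx_pairwise (body : List String) (hnd : body.Nodup) :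
    body.Pairwise (fun a b => pvIdx body a < pvIdx body b) := by
  rw [List.pairwise_iff_getElem]
  intro i j hi hj hij
  have hgi : pvIdx body body[i] = i := by
    unfold pvIdx
    rw [PySem.List.index?_eq_idxOf?]
    rw [(List.idxOf?_eq_some_iff).mpr ⟨hi, rfl, fun m hm => ?_⟩]
    · rfl
    · intro he
      exact absurd (hnd.getElem_inj_iff.mp he) (Nat.ne_of_lt hm)
  have hgj : pvIdx body body[j] = j := by
    unfold pvIdx
    rw [PySem.List.index?_eq_idxOf?]
    rw [(List.idxOf?_eq_some_iff).mpr ⟨hj, rfl, fun m hm => ?_⟩]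
    · rfl
    · intro he
      exact absurd (hnd.getElem_inj_iff.mp he) (Nat.ne_of_lt hm)
  omega

lemma pvScore_of_mem_filter {body : List String} {c : Int} {k : String}
    (h : k ∈ body.filter (fun k => pvScoreB k == c)) : pvScoreB k = c := by
  have := (List.mem_filter.mp h).2
  simpa using this

lemma pvKey_pairwise (body : List String) (hnd : body.Nodup) :
    ((pvF body).map pvPair).Pairwise (fun a b =>
      (fun t => toLex ((-t.1 : Int), pvIdx body t.2)) a <
        (fun t => toLex ((-t.1 : Int), pvIdx body t.2)) b) := by
  rw [List.pairwise_map]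
  have hidx : (pvF body).Pairwise (fun a b =>
      (pvScoreB a = pvScoreB b ∧ pvIdx body a < pvIdx body b) ∨ pvScoreB b < pvScoreB a) := by
    have W : ∀ c : Int, (body.filter (fun k => pvScoreB k == c)).Pairwise (fun a b =>
        (pvScoreB a = pvScoreB b ∧ pvIdx body a < pvIdx body b) ∨ pvScoreB b < pvScoreB a) := by
      intro c
      refine ((pvIdx_pairwise body hnd).sublist List.filter_sublist).imp_of_mem ?_
      intro a b ha hb h
      exact Or.inl ⟨by rw [pvScore_of_mem_filter ha, pvScore_of_mem_filter hb], h⟩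
    have X : ∀ c1 c2 : Int, c2 < c1 →
        ∀ a ∈ body.filter (fun k => pvScoreB k == c1),
        ∀ b ∈ body.filter (fun k => pvScoreB k == c2),
        (pvScoreB a = pvScoreB b ∧ pvIdx body a < pvIdx body b) ∨ pvScoreB b < pvScoreB a := by
      intro c1 c2 hc a ha b hb
      right
      rw [pvScore_of_mem_filter ha, pvScore_of_mem_filter hb]
      exact hc
    unfold pvF
    simp only [List.pairwise_append, List.mem_append]
    refine ⟨⟨⟨⟨W 9, W 6, ?_⟩, W 4, ?_⟩, W 2, ?_⟩, W 0, ?_⟩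
    · intro a ha b hb
      exact X 9 6 (by norm_num) a ha b hb
    · intro a ha b hb
      rcases ha with ha | ha
      · exact X 9 4 (by norm_num) a ha b hb
      · exact X 6 4 (by norm_num) a ha b hb
    · intro a ha b hb
      rcases ha with (ha | ha) | ha
      · exact X 9 2 (by norm_num) a ha b hb
      · exact X 6 2 (by norm_num) a ha b hb
      · exact X 4 2 (by norm_num) a ha b hb
    · intro a ha b hb
      rcases ha with ((ha | ha) | ha) | ha
      · exact X 9 0 (by norm_num) a ha b hb
      · exact X 6 0 (by norm_num) a ha b hb
      · exact X 4 0 (by norm_num) a ha b hb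
      · exact X 2 0 (by norm_num) a ha b hb
  refine hidx.imp ?_
  intro a b hr
  rcases hr with ⟨heq, hlt⟩ | hgt
  · exact Prod.Lex.toLex_lt_toLex.mpr (Or.inr ⟨by simp [pvPair, heq], by simpa [pvPair] using hlt⟩)
  · exact Prod.Lex.toLex_lt_toLex.mpr (Or.inl (by simp [pvPair]; omega))

lemma pvBucket_fold (l : List String) (a9 a6 a4 a2 a0 : List String) :
    l.foldl pvBStep (a9, a6, a4, a2, a0) =
    (a9 ++ l.filter (fun k => pvScoreB k == 9), a6 ++ l.filter (fun k => pvScoreB k == 6),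
     a4 ++ l.filter (fun k => pvScoreB k == 4), a2 ++ l.filter (fun k => pvScoreB k == 2),
     a0 ++ l.filter (fun k => pvScoreB k == 0)) := by
  induction l generalizing a9 a6 a4 a2 a0 with
  | nil => simp
  | cons x t ih =>
    rw [List.foldl_cons]
    rcases pvScore_cases x with h|h|h|h|h
    · rw [show pvBStep (a9, a6, a4, a2, a0) x = (a9, a6, a4, a2, a0 ++ [x]) from by
        simp [pvBStep, h], ih]
      simp [h]
    · rw [show pvBStep (a9, a6, a4, a2, a0) x = (a9, a6, a4, a2 ++ [x], a0) from by
        simp [pvBStep, h], ih]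
      simp [h]
    · rw [show pvBStep (a9, a6, a4, a2, a0) x = (a9, a6, a4 ++ [x], a2, a0) from by
        simp [pvBStep, h], ih]
      simp [h]
    · rw [show pvBStep (a9, a6, a4, a2, a0) x = (a9, a6 ++ [x], a4, a2, a0) from by
        simp [pvBStep, h], ih]
      simp [h]
    · rw [show pvBStep (a9, a6, a4, a2, a0) x = (a9 ++ [x], a6, a4, a2, a0) from by
        simp [pvBStep, h], ih]
      simp [h]

lemma pvMain (body : List String) (hnd : body.Nodup) :
    prefer_keys [] body = prefer_keys_alt [] body := by
  by_cases hb : body = []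
  · subst hb
    rfl
  · unfold prefer_keys prefer_keys_alt
    rw [if_neg (show ¬(([] : List String) ≠ []) by simp), if_neg hb,
        if_neg (show ¬(([] : List String) ≠ []) by simp)]
    have hmap : body.foldl (fun acc k =>
        let score : Int := 0
        let score := if PySem.Str.lower k == "id" then score + 5 else score
        let score := if PySem.Str.endswith (PySem.Str.lower k) "id" then score + 4 else score
        let score := if PySem.Str.isIn "name" (PySem.Str.lower k) then score + 2 else score
        acc ++ [(score, k)]) [] = body.map pvPair := by
      rw [PySem.List.foldl_append_singleton_eq_map]
      rw [List.nil_append]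
      apply List.map_congr_left
      intro k _
      have := pvScoreA_eq k
      simp only [pvPair]
      rw [← this]
    rw [hmap]
    have hsorted : PySem.List.sorted2 (body.map pvPair) (fun t => -t.1)
        (fun t => (PySem.List.index? body t.2).getD 0) = (pvF body).map pvPair := by
      rw [pvSorted2_eq_sorted_lex]
      refine PySem.List.sorted_eq_of_perm_of_pairwise_lt _ _ _ ?_ ?_
      · exact (pvBucket_perm body).map pvPair
      · have := pvKey_pairwise body hnd
        simpa [pvIdx] using this
    simp only [hsorted, pvBucket_fold]
    simp only [List.nil_append]
    rw [PySem.List.slice_to _ (by norm_num : (0:Int) ≤ 2),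
        PySem.List.slice_to _ (by norm_num : (0:Int) ≤ 2)]
    rw [← List.map_take]
    have hcomp : ((fun (t : Int × String) => t.2) ∘ pvPair) = id := by
      funext k
      simp [pvPair]
    simp [hcomp, pvF, List.append_assoc]

-- ===== VERDICT (by name: the statement is the Claim_ definition above) =====
theorem prefer_keys_spec : Claim_equal_prefer_keys := by
  intro path_keys body_keys _ hpre
  unfold Spec_prefer_keys
  by_cases hp : path_keys = []
  · subst hp
    exact pvMain body_keys (hpre rfl)
  · unfold prefer_keys prefer_keys_alt
    rw [if_pos hp, if_pos hp]
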